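-- pv_equiv track=rewrite | github.com/TMusa30/RezolucijaOpovrgavanjem | solution.py | ukloni_nepotrebne_klauzuleCooking
-- ===== SOURCE A (Python) =====
-- def komplementarniDaNe(literali):
--    for literal in literali :
--       if not literal.startswith("~") :
--          komplement = "~" + literal
--       else :
--          komplement = literal[1:]
--       if komplement in literali :
--          return True
--    return False
--
-- def ukloni_nepotrebne_klauzuleCooking(klauzule):
--     spojiKlauzuleiSortiraj = []
--     klauzuleBezKomp = []
--     for klauzula in klauzule:
--         literali = set(klauzula.split())
--         if not komplementarniDaNe(literali):
--            klauzuleBezKomp.append(literali)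
--
--     vratiNajboljeKlauzule = klauzuleBezKomp.copy()
--     for trenutna_klauzula in klauzuleBezKomp:
--
--         for druga_klauzula in klauzuleBezKomp:
--             if trenutna_klauzula > druga_klauzula and druga_klauzula.issubset(trenutna_klauzula):
--                 vratiNajboljeKlauzule.remove(trenutna_klauzula)
--                 break
--
--     for klauzula in vratiNajboljeKlauzule :
--        klauzulaSacuvaj = " ".join(sorted(klauzula))
--        spojiKlauzuleiSortiraj.append(klauzulaSacuvaj)
--     return spojiKlauzuleiSortiraj
-- ===== SOURCE B (Python) =====
-- def ukloni_nepotrebne_klauzuleCooking(klauzule):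
--     bezKomp = []
--     for klauzula in klauzule:
--         literali = set(klauzula.split())
--         if not any(("~" + l if not l.startswith("~") else l[1:]) in literali
--                    for l in literali):
--             bezKomp.append(literali)
--     poVelicini = {}
--     for s in bezKomp:
--         poVelicini.setdefault(len(s), []).append(s)
--     rezultat = []
--     for s in bezKomp:
--         if not any(vel < len(s) and any(manja.issubset(s) for manja in kanta)
--                    for vel, kanta in poVelicini.items()):
--             rezultat.append(" ".join(sorted(s)))
--     return rezultat
-- ===== Notes on version B (the rewrite author's own statement) =====
-- stated objective: faster
-- what changed: Replaces A's copy-then-list.remove pairwise proper-superset scan by an immutable pipeline: group the complement-free clause sets into size buckets once, then keep a clause iff no strictly smaller bucket contains a subset of it, emitting survivors in one filtering pass.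
import Mathlib
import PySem

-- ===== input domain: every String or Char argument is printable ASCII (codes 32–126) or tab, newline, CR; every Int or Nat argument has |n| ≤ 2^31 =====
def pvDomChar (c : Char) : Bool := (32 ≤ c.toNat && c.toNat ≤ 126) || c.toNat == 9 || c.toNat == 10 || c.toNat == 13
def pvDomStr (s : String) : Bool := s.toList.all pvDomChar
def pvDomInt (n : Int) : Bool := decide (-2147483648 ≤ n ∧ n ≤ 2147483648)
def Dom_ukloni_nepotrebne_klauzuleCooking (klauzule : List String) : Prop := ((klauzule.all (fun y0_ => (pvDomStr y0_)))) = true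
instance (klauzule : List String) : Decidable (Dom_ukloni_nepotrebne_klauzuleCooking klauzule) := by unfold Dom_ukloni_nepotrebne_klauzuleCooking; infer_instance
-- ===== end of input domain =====

-- B replaces A's copy-then-list.remove pairwise superset scan by an immutable pipeline:
-- group the complement-free clause sets into size buckets once, keep a clause iff no
-- strictly smaller bucket holds a subset of it (objective: faster, measured).

-- ===== PORT A =====
def komplementarniDaNe (literali : PySem.Set String) : Bool :=
  literali.any (fun literal =>
    let komplement := if !(PySem.Str.startswith literal "~")
      then "~" ++ literal
      else PySem.Str.slice literal (some 1) none
    PySem.Set.contains literali komplement)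

def ukloni_nepotrebne_klauzuleCooking (klauzule : List String) : List String :=
  let klauzuleBezKomp : List (PySem.Set String) :=
    klauzule.foldl (fun acc klauzula =>
      let literali : PySem.Set String := PySem.Set.ofList (PySem.Str.split₀ klauzula)
      if !(komplementarniDaNe literali) then acc ++ [literali] else acc) []
  let vratiNajboljeKlauzule :=
    klauzuleBezKomp.foldl (fun vrati trenutna =>
      if klauzuleBezKomp.any (fun druga =>
            (PySem.Set.issuperset trenutna druga && !(PySem.Set.equal trenutna druga))
              && PySem.Set.issubset druga trenutna) then
        -- list.remove: the removed set is always still present; the none branch is a totality guard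
        match PySem.List.remove? vrati trenutna with
        | some v => v
        | none => vrati
      else vrati) klauzuleBezKomp
  vratiNajboljeKlauzule.foldl (fun acc klauzula =>
    acc ++ [PySem.Str.join " " (PySem.List.sorted klauzula (fun x => x) false)]) []

-- ===== PORT B =====
def ukloni_nepotrebne_klauzuleCooking_alt (klauzule : List String) : List String :=
  let bezKomp : List (PySem.Set String) :=
    klauzule.foldl (fun acc klauzula =>
      let literali : PySem.Set String := PySem.Set.ofList (PySem.Str.split₀ klauzula)
      if !(literali.any (fun l =>
            PySem.Set.contains literali
              (if !(PySem.Str.startswith l "~") then "~" ++ l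
               else PySem.Str.slice l (some 1) none)))
      then acc ++ [literali] else acc) []
  let poVelicini : PySem.Dict Int (List (PySem.Set String)) :=
    bezKomp.foldl (fun d s => d.modify (PySem.Set.len s) [] (fun xs => xs ++ [s])) PySem.Dict.empty
  bezKomp.foldl (fun acc s =>
    if !(poVelicini.items.any (fun p =>
          decide (p.1 < PySem.Set.len s) && p.2.any (fun manja => PySem.Set.issubset manja s)))
    then acc ++ [PySem.Str.join " " (PySem.List.sorted s (fun x => x) false)] else acc) []

-- ===== PRECONDITION & SPEC =====
def Spec_ukloni_nepotrebne_klauzuleCooking (klauzule : List String) (out : List String) : Prop := out = ukloni_nepotrebne_klauzuleCooking_alt klauzule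
instance (klauzule : List String) (out : List String) : Decidable (Spec_ukloni_nepotrebne_klauzuleCooking klauzule out) := by unfold Spec_ukloni_nepotrebne_klauzuleCooking; infer_instance

-- ===== CLAIM (what is proved, stated in full; the proofs are below) =====
def Claim_equal_ukloni_nepotrebne_klauzuleCooking : Prop := ∀ (klauzule : List String), Dom_ukloni_nepotrebne_klauzuleCooking klauzule → Spec_ukloni_nepotrebne_klauzuleCooking klauzule (ukloni_nepotrebne_klauzuleCooking klauzule)

-- ===== LEMMAS AND PROOFS =====

-- every member of the filtered clause list is a PySem set, hence Nodup
lemma nodup_mem_bezKomp (l : List String) (acc : List (PySem.Set String))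
    (h : ∀ t ∈ acc, t.Nodup) :
    ∀ t ∈ l.foldl (fun acc klauzula =>
        let literali : PySem.Set String := PySem.Set.ofList (PySem.Str.split₀ klauzula)
        if !(komplementarniDaNe literali) then acc ++ [literali] else acc) acc, t.Nodup := by
  induction l generalizing acc with
  | nil => exact h
  | cons k l ih =>
    intro t ht
    refine ih _ ?_ t ht
    intro u hu
    by_cases hc : !(komplementarniDaNe (PySem.Set.ofList (PySem.Str.split₀ k)))
    · simp only [hc, if_pos, List.mem_append, List.mem_singleton] at hu
      rcases hu with hu | rfl
      · exact h u hu
      · exact PySem.Set.nodup_ofList _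
    · simp only [hc] at hu
      exact h u hu


-- A's remove loop: invariant "state = filtered processed prefix ++ rest"
lemma removeFold (c : PySem.Set String → Bool) :
    ∀ (s p : List (PySem.Set String)),
    s.foldl (fun vrati t =>
        if c t then
          match PySem.List.remove? vrati t with
          | some v => v
          | none => vrati
        else vrati) (p.filter (fun x => !c x) ++ s)
      = (p ++ s).filter (fun x => !c x) := by
  intro s
  induction s with
  | nil => intro p; simp
  | cons t s ih =>
    intro p
    rw [List.foldl_cons]
    by_cases hct : c t = true
    · rw [if_pos hct]
      have hmem : t ∈ p.filter (fun x => !c x) ++ t :: s := by simp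
      rw [PySem.List.remove?_eq_some_erase _ t hmem]
      have hnotin : t ∉ p.filter (fun x => !c x) := by
        intro hx
        rcases List.mem_filter.mp hx with ⟨_, hb⟩
        simp [hct] at hb
      have herase : (p.filter (fun x => !c x) ++ t :: s).erase t
          = p.filter (fun x => !c x) ++ s := by
        rw [List.erase_append_right _ hnotin, List.erase_cons_head]
      have hfp : (p ++ [t]).filter (fun x => !c x) = p.filter (fun x => !c x) := by
        simp [List.filter_append, hct]
      calc List.foldl _ ((p.filter (fun x => !c x) ++ t :: s).erase t) s
            = List.foldl _ ((p ++ [t]).filter (fun x => !c x) ++ s) s := by rw [herase, hfp]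
        _ = ((p ++ [t]) ++ s).filter (fun x => !c x) := ih (p ++ [t])
        _ = (p ++ t :: s).filter (fun x => !c x) := by simp
    · rw [if_neg hct]
      have hfp : (p ++ [t]).filter (fun x => !c x) = p.filter (fun x => !c x) ++ [t] := by
        simp [List.filter_append, hct]
      calc List.foldl _ (p.filter (fun x => !c x) ++ t :: s) s
            = List.foldl _ ((p ++ [t]).filter (fun x => !c x) ++ s) s := by rw [hfp]; simp
        _ = ((p ++ [t]) ++ s).filter (fun x => !c x) := ih (p ++ [t])
        _ = (p ++ t :: s).filter (fun x => !c x) := by simp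

-- a Nodup list included in another list is no longer than it
lemma nodup_len_le {l₁ l₂ : List String} (h : l₁.Nodup) (hs : ∀ x ∈ l₁, x ∈ l₂) :
    l₁.length ≤ l₂.length := by
  have hsub : l₁.toFinset ⊆ l₂.toFinset := by
    intro x hx
    simp only [List.mem_toFinset] at hx ⊢
    exact hs x hx
  have hc := Finset.card_le_card hsub
  rw [List.toFinset_card_of_nodup h] at hc
  exact hc.trans (List.toFinset_card_le l₂)


-- pointwise: A's proper-superset test = "strictly smaller subset" on Nodup sets
lemma propSuper_iff (s d : PySem.Set String) (hs : s.Nodup) (hd : d.Nodup) :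
    (((PySem.Set.issuperset s d && !(PySem.Set.equal s d)) && PySem.Set.issubset d s) = true)
      ↔ (d.length < s.length ∧ ∀ x ∈ d, x ∈ s) := by
  simp only [Bool.and_eq_true, Bool.not_eq_true', Bool.eq_false_iff, ne_eq,
    PySem.Set.issuperset_iff, PySem.Set.issubset_iff, PySem.Set.equal_iff]
  constructor
  · rintro ⟨⟨hsup, hne⟩, hsub⟩
    refine ⟨?_, hsup⟩
    rcases lt_or_eq_of_le (nodup_len_le hd hsup) with hlt | heq
    · exact hlt
    · exfalso
      apply hne
      have hfs : d.toFinset = s.toFinset := by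
        apply Finset.eq_of_subset_of_card_le
        · intro x hx; simp only [List.mem_toFinset] at hx ⊢; exact hsup x hx
        · rw [List.toFinset_card_of_nodup hd, heq]
          exact List.toFinset_card_le s
      intro x
      constructor
      · intro hx
        have : x ∈ s.toFinset := List.mem_toFinset.mpr hx
        rw [← hfs] at this
        exact List.mem_toFinset.mp this
      · exact fun hx => hsup x hx
  · rintro ⟨hlt, hsub⟩
    refine ⟨⟨hsub, ?_⟩, hsub⟩
    intro hiff
    have : s.length ≤ d.length := nodup_len_le hs (fun x hx => (hiff x).mp hx)
    omega


-- B's bucket test = "some strictly smaller kept set is a subset"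
lemma bucket_iff (kept : List (PySem.Set String)) (s : PySem.Set String) :
    ((kept.foldl (fun d t => d.modify (PySem.Set.len t) [] (fun xs => xs ++ [t]))
        PySem.Dict.empty).items.any (fun p =>
          decide (p.1 < PySem.Set.len s) && p.2.any (fun manja => PySem.Set.issubset manja s)) = true)
      ↔ ∃ d ∈ kept, d.length < s.length ∧ (∀ x ∈ d, x ∈ s) := by
  set D := kept.foldl (fun d t => d.modify (PySem.Set.len t) [] (fun xs => xs ++ [t]))
        PySem.Dict.empty with hD
  have hnd : D.keys.Nodup := by
    apply PySem.Dict.nodup_keys_foldl_modify_key kept PySem.Set.len []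
      (fun _ t => fun xs => xs ++ [t]) PySem.Dict.empty
    simp [PySem.Dict.keys_empty]
  have hkeys : D.keys = PySem.Set.ofList (kept.map PySem.Set.len) := by
    have := PySem.Dict.keys_foldl_modify_key kept PySem.Set.len []
      (fun _ t => fun xs => xs ++ [t]) PySem.Dict.empty
    rw [hD, this]
    simp [PySem.Dict.keys_empty, PySem.Set.update_nil_left]
  have hgetD : ∀ c, D.getD c [] = kept.filter (fun t => PySem.Set.len t == c) := by
    intro c
    have hmap : D = (kept.map (fun t => (PySem.Set.len t, t))).foldl
        (fun d p => d.modify p.1 [] (fun xs => xs ++ [p.2])) PySem.Dict.empty := by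
      rw [hD, List.foldl_map]
    rw [hmap, PySem.Dict.getD_foldl_modify_append, List.filter_map]
    simp [List.map_map, Function.comp_def, PySem.Dict.getD_empty]
  rw [PySem.Dict.items_eq_map_keys D hnd [], List.any_map]
  simp only [Function.comp_def, hgetD, hkeys]
  simp only [List.any_eq_true, PySem.Set.mem_ofList, List.mem_map, List.mem_filter,
    Bool.and_eq_true, decide_eq_true_eq, PySem.Set.issubset_iff, beq_iff_eq]
  constructor
  · rintro ⟨c, ⟨t0, ht0, rfl⟩, hlt, d, ⟨hdk, hlen⟩, hsub⟩
    refine ⟨d, hdk, ?_, hsub⟩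
    have : PySem.Set.len d < PySem.Set.len s := hlen ▸ hlt
    simpa [PySem.Set.len] using this
  · rintro ⟨d, hdk, hlt, hsub⟩
    refine ⟨PySem.Set.len d, ⟨d, hdk, rfl⟩, ?_, d, ⟨hdk, rfl⟩, hsub⟩
    simpa [PySem.Set.len] using hlt

-- the two second phases agree on any list of Nodup sets
lemma phases (kept : List (PySem.Set String)) (h : ∀ t ∈ kept, t.Nodup) :
    (kept.foldl (fun vrati trenutna =>
        if kept.any (fun druga =>
              (PySem.Set.issuperset trenutna druga && !(PySem.Set.equal trenutna druga))
                && PySem.Set.issubset druga trenutna) then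
          match PySem.List.remove? vrati trenutna with
          | some v => v
          | none => vrati
        else vrati) kept).foldl (fun acc klauzula =>
      acc ++ [PySem.Str.join " " (PySem.List.sorted klauzula (fun x => x) false)]) []
    = kept.foldl (fun acc s =>
        if !((kept.foldl (fun d t => d.modify (PySem.Set.len t) [] (fun xs => xs ++ [t]))
              PySem.Dict.empty).items.any (fun p =>
                decide (p.1 < PySem.Set.len s) && p.2.any (fun manja => PySem.Set.issubset manja s)))
        then acc ++ [PySem.Str.join " " (PySem.List.sorted s (fun x => x) false)] else acc) [] := by
  have hA := removeFold (fun trenutna => kept.any (fun druga =>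
      (PySem.Set.issuperset trenutna druga && !(PySem.Set.equal trenutna druga))
        && PySem.Set.issubset druga trenutna)) kept []
  simp only [List.filter_nil, List.nil_append] at hA
  rw [hA, PySem.List.foldl_append_singleton_eq_map, List.nil_append]
  rw [PySem.List.foldl_append_if
      (fun s => !((kept.foldl (fun d t => d.modify (PySem.Set.len t) [] (fun xs => xs ++ [t]))
              PySem.Dict.empty).items.any (fun p =>
                decide (p.1 < PySem.Set.len s) && p.2.any (fun manja => PySem.Set.issubset manja s))))
      (fun s => PySem.Str.join " " (PySem.List.sorted s (fun x => x) false)) kept [],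
    List.nil_append]
  congr 1
  apply List.filter_congr
  intro t ht
  have heq : (kept.any (fun druga =>
      (PySem.Set.issuperset t druga && !(PySem.Set.equal t druga))
        && PySem.Set.issubset druga t))
      = ((kept.foldl (fun d u => d.modify (PySem.Set.len u) [] (fun xs => xs ++ [u]))
              PySem.Dict.empty).items.any (fun p =>
                decide (p.1 < PySem.Set.len t) && p.2.any (fun manja => PySem.Set.issubset manja t))) := by
    rw [Bool.eq_iff_iff, List.any_eq_true, bucket_iff kept t]
    constructor
    · rintro ⟨d, hd, hp⟩
      exact ⟨d, hd, (propSuper_iff t d (h t ht) (h d hd)).mp hp⟩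
    · rintro ⟨d, hd, hp⟩
      exact ⟨d, hd, (propSuper_iff t d (h t ht) (h d hd)).mpr hp⟩
  rw [heq]


-- ===== VERDICT (by name: the statement is the Claim_ definition above) =====
theorem ukloni_nepotrebne_klauzuleCooking_spec : Claim_equal_ukloni_nepotrebne_klauzuleCooking := by
  intro klauzule _
  unfold Spec_ukloni_nepotrebne_klauzuleCooking
  unfold ukloni_nepotrebne_klauzuleCooking ukloni_nepotrebne_klauzuleCooking_alt
  exact phases _ (nodup_mem_bezKomp klauzule [] (by simp))
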